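-- pv_equiv track=rewrite | github.com/linhdvu14/cp-sols | sols/CodeForces/1875_d2/C_Jellyfish_and_Green_Apple.py | solve
-- ===== SOURCE A (Python) =====
-- from math import gcd
--
-- BITS = 30
--
-- def solve(a, b):
--     a %= b
--     if not a: return 0
--
--     g = gcd(a, b)
--     a //= g
--     b //= g
--     if bin(b).count('1') != 1: return -1
--
--     res = 0
--     for i in range(BITS):
--         if (a >> i) & 1 == 0: continue
--         two = 1 << i
--         res += two * (b // two - 1)
--
--     return res * g
-- ===== SOURCE B (Python) =====
-- from math import gcd
--
-- def solve(a, b):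
--     r = a % b
--     if r == 0:
--         return 0
--     g = gcd(r, b)
--     p = r // g
--     q = b // g
--     if q.bit_count() != 1:
--         return -1
--     return (p.bit_count() * q - p) * g
-- ===== Notes on version B (the rewrite author's own statement) =====
-- stated objective: simpler
-- what changed: replaces the fixed 30-iteration bit-scanning loop (each set bit i adds 2^i*(b//2^i - 1)) by the closed form p.bit_count()*q - p, since each set bit of the reduced numerator contributes exactly q - 2^i
-- intended difference: when b = 2^31 and the reduced numerator a%b is odd with bit 30 set, A's loop (capped at 30 bits) silently drops the bit-30 contribution and returns a too-small count, while B's closed form counts every bit and returns the intended value — e.g. on solve(1073741825, 2147483648): A returns 2147483647, B returns 3221225471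
-- outside the precondition, e.g. on solve(1, -4): A returns -2147483645, B returns -5; on solve(5, -2): A returns -2147483647, B returns -1
import Mathlib
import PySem

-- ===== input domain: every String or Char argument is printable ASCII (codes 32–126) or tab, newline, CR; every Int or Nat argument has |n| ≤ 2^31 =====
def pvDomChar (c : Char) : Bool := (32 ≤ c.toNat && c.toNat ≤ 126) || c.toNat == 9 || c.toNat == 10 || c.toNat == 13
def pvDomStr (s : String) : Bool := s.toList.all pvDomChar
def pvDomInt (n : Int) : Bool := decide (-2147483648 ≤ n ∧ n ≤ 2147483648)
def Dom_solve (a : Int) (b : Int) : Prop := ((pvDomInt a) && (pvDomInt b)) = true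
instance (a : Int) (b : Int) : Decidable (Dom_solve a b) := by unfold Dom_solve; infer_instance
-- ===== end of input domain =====

-- B replaces A's fixed 30-iteration bit loop by the closed form bit_count(p)*q - p (each set
-- bit 2^i of the reduced numerator contributes q - 2^i); objective: simpler.

-- ===== PORT A =====
-- body of A's 'for i in range(BITS)' loop: 'if (a >> i) & 1 == 0: continue; two = 1 << i; res += two * (b // two - 1)'
def solveLoopBody (a : Int) (b : Int) (res : Int) (i : Int) : Int :=
  if PySem.Int.band (a >>> i.toNat) 1 = 0 then res
  else res + ((1 : Int) <<< i.toNat) * (PySem.Int.floordiv b ((1 : Int) <<< i.toNat) - 1)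

def solve (a : Int) (b : Int) : Int :=
  let a1 := PySem.Int.mod a b
  if a1 = 0 then 0
  else
    let g : Int := Int.gcd a1 b
    let a2 := PySem.Int.floordiv a1 g
    let b2 := PySem.Int.floordiv b g
    -- bin(b).count('1') = popcount of |b| = PySem.Int.bitCount
    if PySem.Int.bitCount b2 ≠ 1 then -1
    else ((PySem.List.pyRange 0 30 1).foldl (solveLoopBody a2 b2) 0) * g

-- ===== PORT B =====
def solve_alt (a : Int) (b : Int) : Int :=
  let r := PySem.Int.mod a b
  if r = 0 then 0
  else
    let g : Int := Int.gcd r b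
    let p := PySem.Int.floordiv r g
    let q := PySem.Int.floordiv b g
    if PySem.Int.bitCount q ≠ 1 then -1
    else ((PySem.Int.bitCount p : Int) * q - p) * g

-- ===== PRECONDITION & SPEC =====
-- Pre_ excludes b = 0 (both programs raise ZeroDivisionError) and b < 0, a corner outside the
-- problem's domain (b is a number of people) where A's and B's values are both accidental
-- artefacts (A of bin(q)'s '-0b' prefix and arithmetic right shifts on negatives, B of
-- bit_count reading |q|) and neither is specified.
def Pre_solve (a : Int) (b : Int) : Prop := 0 < b
instance (a : Int) (b : Int) : Decidable (Pre_solve a b) := by unfold Pre_solve; infer_instance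
def pvWitness_solve : Int × Int := (5, 6)

-- When b = 2^31 and the reduced numerator a%b is odd with bit 30 set, A's loop (capped at 30
-- bits) silently drops the bit-30 contribution and returns a too-small count, while B's closed
-- form counts every bit and returns the intended value.
def D_solve (a : Int) (b : Int) : Prop :=
  b = 2147483648 ∧ PySem.Int.mod a b % 2 = 1 ∧ 1073741824 ≤ PySem.Int.mod a b
instance (a : Int) (b : Int) : Decidable (D_solve a b) := by unfold D_solve; infer_instance

def Spec_solve (a : Int) (b : Int) (out : Int) : Prop := ¬ D_solve a b → out = solve_alt a b
instance (a : Int) (b : Int) (out : Int) : Decidable (Spec_solve a b out) := by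
  unfold Spec_solve; infer_instance

def pvDiffWitness_solve : Int × Int := (1073741825, 2147483648)
def pvDiffWitnessOut_solve : Int × Int := (2147483647, 3221225471)

-- ===== CLAIM (what is proved, stated in full; the proofs are below) =====
def Claim_unchanged_solve : Prop :=
  ∀ (a : Int) (b : Int), Dom_solve a b → Pre_solve a b → Spec_solve a b (solve a b)
def Claim_changed_solve : Prop :=
  Dom_solve (pvDiffWitness_solve.1) (pvDiffWitness_solve.2) ∧
  Pre_solve (pvDiffWitness_solve.1) (pvDiffWitness_solve.2) ∧
  D_solve (pvDiffWitness_solve.1) (pvDiffWitness_solve.2) ∧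
  solve (pvDiffWitness_solve.1) (pvDiffWitness_solve.2) = pvDiffWitnessOut_solve.1 ∧
  solve_alt (pvDiffWitness_solve.1) (pvDiffWitness_solve.2) = pvDiffWitnessOut_solve.2 ∧
  pvDiffWitnessOut_solve.1 ≠ pvDiffWitnessOut_solve.2
def Claim_exact_solve : Prop :=
  ∀ (a : Int) (b : Int), Dom_solve a b → Pre_solve a b → D_solve a b → solve a b ≠ solve_alt a b

-- ===== LEMMAS AND PROOFS =====

-- adding a power of two above all set bits increments the popcount
theorem pc_add_pow : ∀ (k y : ℕ), y < 2 ^ k →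
    PySem.Int.bitCount ((y + 2 ^ k : ℕ) : ℤ) = PySem.Int.bitCount (y : ℤ) + 1 := by
  intro k
  induction k with
  | zero =>
    intro y hy
    interval_cases y
    decide
  | succ k ih =>
    intro y hy
    have h2 : 2 ^ (k + 1) = 2 * 2 ^ k := by ring
    have hpos : 0 < y + 2 ^ (k + 1) := by positivity
    rw [PySem.Int.bitCount_natCast hpos]
    have e1 : (y + 2 ^ (k + 1)) % 2 = y % 2 := by omega
    have e2 : (y + 2 ^ (k + 1)) / 2 = y / 2 + 2 ^ k := by omega
    rw [e1, e2, ih (y / 2) (by omega)]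
    rcases Nat.eq_zero_or_pos y with hy0 | hy0
    · subst hy0; simp [PySem.Int.bitCount_zero]
    · rw [PySem.Int.bitCount_natCast hy0]; omega

theorem pc_pos : ∀ n : ℕ, 0 < n → 0 < PySem.Int.bitCount (n : ℤ) := by
  intro n
  induction n using Nat.strong_induction_on with
  | _ n ih =>
    intro hn
    rw [PySem.Int.bitCount_natCast hn]
    rcases Nat.mod_two_eq_zero_or_one n with h | h
    · have hh : 0 < n / 2 := by omega
      have := ih (n / 2) (by omega) hh
      omega
    · omega

theorem pc_eq_one : ∀ n : ℕ, 0 < n → PySem.Int.bitCount (n : ℤ) = 1 → ∃ k, n = 2 ^ k := by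
  intro n
  induction n using Nat.strong_induction_on with
  | _ n ih =>
    intro hn h
    rw [PySem.Int.bitCount_natCast hn] at h
    rcases Nat.mod_two_eq_zero_or_one n with hpar | hpar
    · have hh : 0 < n / 2 := by omega
      obtain ⟨k, hk⟩ := ih (n / 2) (by omega) hh (by omega)
      exact ⟨k + 1, by rw [pow_succ]; omega⟩
    · have h0 : PySem.Int.bitCount ((n / 2 : ℕ) : ℤ) = 0 := by omega
      have hz : n / 2 = 0 := by
        by_contra hnz
        have := pc_pos (n / 2) (by omega)
        omega
      exact ⟨0, by omega⟩

-- A's loop over range(n) evaluated in closed form when the denominator is a power of two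
theorem loop_eval (x m : ℕ) (hx : x < 2 ^ m) :
    ∀ n : ℕ, (PySem.List.pyRange 0 n 1).foldl (solveLoopBody (x : ℤ) ((2 ^ m : ℕ) : ℤ)) 0
      = (PySem.Int.bitCount ((x % 2 ^ n : ℕ) : ℤ) : ℤ) * ((2 ^ m : ℕ) : ℤ) - ((x % 2 ^ n : ℕ) : ℤ) := by
  intro n
  induction n with
  | zero => simp [PySem.List.pyRange_one_eq_nil, Nat.mod_one, PySem.Int.bitCount_zero]
  | succ n ih =>
    have hcast : ((n + 1 : ℕ) : ℤ) = (n : ℤ) + 1 := by push_cast; ring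
    rw [hcast, PySem.List.pyRange_one_succ_right (by positivity), List.foldl_append, ih]
    show solveLoopBody _ _ _ _ = _
    unfold solveLoopBody
    have htn : ((n : ℤ)).toNat = n := Int.toNat_natCast n
    have hshift : ((x : ℤ) >>> n) = ((x / 2 ^ n : ℕ) : ℤ) := by
      rw [Int.shiftRight_eq_div_pow, ← Int.natCast_ediv]
    have hband : PySem.Int.band ((x / 2 ^ n : ℕ) : ℤ) 1 = ((x / 2 ^ n % 2 : ℕ) : ℤ) := by
      rw [PySem.Int.band_one, show (2 : ℤ) = ((2 : ℕ) : ℤ) from by norm_num, PySem.Int.mod_natCast]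
    have hone : ((1 : ℤ) <<< n) = ((2 ^ n : ℕ) : ℤ) := by
      rw [Int.shiftLeft_eq, one_mul]; push_cast; ring
    rw [htn, hshift, hband, hone]
    rcases Nat.mod_two_eq_zero_or_one (x / 2 ^ n) with h | h
    · rw [h]
      have hmod : x % 2 ^ (n + 1) = x % 2 ^ n := by
        rw [Nat.mod_pow_succ, h]; ring
      simp [hmod]
    · rw [h]
      have hne : ((1 : ℕ) : ℤ) ≠ 0 := by norm_num
      have hxn : 2 ^ n ≤ x := by
        by_contra hc
        have : x / 2 ^ n = 0 := Nat.div_eq_of_lt (by omega)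
        omega
      have hnm : n < m := by
        have : (2 : ℕ) ^ n < 2 ^ m := by omega
        exact (Nat.pow_lt_pow_iff_right (by norm_num)).mp this
      have hdiv : PySem.Int.floordiv ((2 ^ m : ℕ) : ℤ) ((2 ^ n : ℕ) : ℤ)
          = ((2 ^ (m - n) : ℕ) : ℤ) := by
        rw [PySem.Int.floordiv_natCast, Nat.pow_div (Nat.le_of_lt hnm) (by norm_num)]
      have hmod : x % 2 ^ (n + 1) = x % 2 ^ n + 2 ^ n := by
        rw [Nat.mod_pow_succ, h]; ring
      have hpc : PySem.Int.bitCount ((x % 2 ^ n + 2 ^ n : ℕ) : ℤ)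
          = PySem.Int.bitCount ((x % 2 ^ n : ℕ) : ℤ) + 1 :=
        pc_add_pow n (x % 2 ^ n) (Nat.mod_lt x (by positivity))
      have hpow : ((2 : ℤ) ^ n) * ((2 : ℤ) ^ (m - n)) = (2 : ℤ) ^ m := by
        rw [← pow_add]; congr 1; omega
      rw [if_neg (by simp), hdiv, hmod, hpc]
      push_cast
      linear_combination hpow

-- the two programs agree whenever 0 < b ≤ 2^31 and the input is outside D_
theorem main_eq (a b : Int) (hb : 0 < b) (hbdom : b ≤ 2147483648) (hD : ¬ D_solve a b) :
    solve a b = solve_alt a b := by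
  by_cases h0 : PySem.Int.mod a b = 0
  · simp [solve, solve_alt, h0]
  · have hx0 : 0 ≤ PySem.Int.mod a b := PySem.Int.mod_nonneg a hb
    have hxb : PySem.Int.mod a b < b := PySem.Int.mod_lt a hb
    set x := PySem.Int.mod a b with hxdef
    have hGpos : 0 < Int.gcd x b := Int.gcd_pos_iff.mpr (Or.inl h0)
    have hg : (0 : ℤ) < (Int.gcd x b : ℤ) := by exact_mod_cast hGpos
    obtain ⟨c, hc⟩ : ((Int.gcd x b : ℤ)) ∣ x := Int.gcd_dvd_left x b
    obtain ⟨d, hd⟩ : ((Int.gcd x b : ℤ)) ∣ b := Int.gcd_dvd_right x b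
    have hfc : PySem.Int.floordiv x (Int.gcd x b) = c := by
      rw [PySem.Int.floordiv_eq_ediv_of_pos hg]
      exact Int.ediv_eq_of_eq_mul_left (ne_of_gt hg) (by linarith [hc])
    have hfd : PySem.Int.floordiv b (Int.gcd x b) = d := by
      rw [PySem.Int.floordiv_eq_ediv_of_pos hg]
      exact Int.ediv_eq_of_eq_mul_left (ne_of_gt hg) (by linarith [hd])
    have hcpos : 0 < c := by nlinarith [lt_of_le_of_ne hx0 (Ne.symm h0)]
    have hdpos : 0 < d := by nlinarith
    have hcd : c < d := by nlinarith
    have e1 : x / ((Int.gcd x b : ℕ) : ℤ) = c :=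
      ((PySem.Int.floordiv_eq_ediv_of_pos hg).symm).trans hfc
    have e2 : b / ((Int.gcd x b : ℕ) : ℤ) = d :=
      ((PySem.Int.floordiv_eq_ediv_of_pos hg).symm).trans hfd
    have hcop : Int.gcd c d = 1 := by
      have h := Int.gcd_div_gcd_div_gcd (i := x) (j := b) hGpos
      rwa [e1, e2] at h
    simp only [solve, solve_alt, ← hxdef, if_neg h0, hfc, hfd]
    by_cases hbc : PySem.Int.bitCount d = 1
    · rw [if_neg (by simpa using hbc), if_neg (by simpa using hbc)]
      have hd0 : d = ((d.toNat : ℕ) : ℤ) := (Int.toNat_of_nonneg (le_of_lt hdpos)).symm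
      obtain ⟨m, hm⟩ : ∃ m, d.toNat = 2 ^ m := by
        refine pc_eq_one d.toNat (by omega) ?_
        rw [← hd0]; exact hbc
      have hc0 : c = ((c.toNat : ℕ) : ℤ) := (Int.toNat_of_nonneg (le_of_lt hcpos)).symm
      have hXm : c.toNat < 2 ^ m := by
        have : c < ((2 ^ m : ℕ) : ℤ) := by rw [← hm, ← hd0]; exact hcd
        omega
      have hdb : d ≤ b := by nlinarith
      have hm31 : m ≤ 31 := by
        have hle : (2 : ℕ) ^ m ≤ 2 ^ 31 := by
          have : ((2 ^ m : ℕ) : ℤ) ≤ 2147483648 := by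
            rw [← hm, ← hd0]; omega
          exact_mod_cast this
        exact (Nat.pow_le_pow_iff_right (by norm_num)).mp hle
      have hX30 : c.toNat < 2 ^ 30 := by
        by_cases hm' : m ≤ 30
        · have : (2 : ℕ) ^ m ≤ 2 ^ 30 := Nat.pow_le_pow_right (by norm_num) hm'
          omega
        · have hm'' : m = 31 := by omega
          subst hm''
          have hd31 : d = 2147483648 := by rw [hd0, hm]; norm_num
          have hbd : b = d := by omega
          have hg1 : (Int.gcd x b : ℤ) = 1 := by nlinarith
          have hxc : x = c := by rw [hc, hg1, one_mul]
          have hodd : c.toNat % 2 = 1 := by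
            rcases Nat.mod_two_eq_zero_or_one c.toNat with he | he
            · exfalso
              have h2c : (2 : ℤ) ∣ c := by omega
              have h2d : (2 : ℤ) ∣ d := by rw [hd31]; norm_num
              have hdv := Int.dvd_gcd h2c h2d
              rw [hcop] at hdv
              norm_num at hdv
            · exact he
          have hnD : x < 1073741824 := by
            by_contra hge
            exact hD ⟨by omega, by omega, by omega⟩
          omega
      have hfold := loop_eval c.toNat m hXm 30
      have hmod30 : c.toNat % 2 ^ 30 = c.toNat := Nat.mod_eq_of_lt hX30
      have hdm : d = ((2 ^ m : ℕ) : ℤ) := by rw [hd0, hm]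
      have hfold := loop_eval c.toNat m hXm 30
      rw [show ((30 : ℕ) : ℤ) = 30 from by norm_num] at hfold
      rw [Nat.mod_eq_of_lt (by
        have h30 : (2 : ℕ) ^ 30 ≤ 2 ^ 30 := le_refl _
        omega)] at hfold
      rw [hc0, hdm, hfold]
    · rw [if_pos (by simpa using hbc), if_pos (by simpa using hbc)]
-- ===== VERDICT (by name: the statement is the Claim_ definition above) =====
theorem solve_spec : Claim_unchanged_solve := by
  intro a b hdom hpre hD
  have hb31 : b ≤ 2147483648 := by
    unfold Dom_solve pvDomInt at hdom
    simp only [Bool.and_eq_true, decide_eq_true_eq] at hdom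
    exact hdom.2.2
  exact main_eq a b hpre hb31 hD

theorem solve_changed : Claim_changed_solve := by
  unfold Claim_changed_solve; decide

theorem solve_tight : Claim_exact_solve := by
  intro a b _ _ hD
  obtain ⟨hb31, hodd, hge⟩ := hD
  subst hb31
  have hx0 : 0 ≤ PySem.Int.mod a 2147483648 := PySem.Int.mod_nonneg a (by norm_num)
  have hxb : PySem.Int.mod a 2147483648 < 2147483648 := PySem.Int.mod_lt a (by norm_num)
  set x := PySem.Int.mod a 2147483648 with hxdef
  have h0 : ¬ x = 0 := by omega
  have hG : Int.gcd x 2147483648 = 1 := by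
    have h2 : Nat.Coprime 2 x.natAbs :=
      (Nat.Prime.coprime_iff_not_dvd Nat.prime_two).mpr (by omega)
    have hcp : Nat.Coprime x.natAbs (2 ^ 31) := Nat.Coprime.pow_right 31 h2.symm
    have h31 : ((2147483648 : ℤ)).natAbs = 2 ^ 31 := by norm_num
    unfold Int.gcd
    rw [h31]
    exact hcp
  have hg1 : ((Int.gcd x 2147483648 : ℕ) : ℤ) = 1 := by rw [hG]; norm_num
  have hf1 : ∀ z : ℤ, PySem.Int.floordiv z 1 = z := fun z => by
    rw [PySem.Int.floordiv_eq_ediv_of_pos one_pos, Int.ediv_one]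
  have hbc : PySem.Int.bitCount 2147483648 = 1 := by decide
  simp only [solve, solve_alt, ← hxdef, if_neg h0, hg1, hf1, mul_one,
    if_neg (show ¬ PySem.Int.bitCount 2147483648 ≠ 1 from by simpa using hbc)]
  have hc0 : x = ((x.toNat : ℕ) : ℤ) := (Int.toNat_of_nonneg hx0).symm
  have hXlt : x.toNat < 2 ^ 31 := by
    have he : (2 : ℕ) ^ 31 = 2147483648 := by norm_num
    omega
  have hXge : 2 ^ 30 ≤ x.toNat := by
    have he : (2 : ℕ) ^ 30 = 1073741824 := by norm_num
    omega
  have h2147 : (((2 ^ 31 : ℕ)) : ℤ) = 2147483648 := by norm_num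
  rw [hc0, ← h2147]
  have hfold := loop_eval x.toNat 31 hXlt 30
  rw [show ((30 : ℕ) : ℤ) = 30 from by norm_num] at hfold
  rw [hfold]
  have hmod : x.toNat % 2 ^ 30 = x.toNat - 2 ^ 30 := by
    have hlt : x.toNat - 2 ^ 30 < 2 ^ 30 := by
      have : (2 : ℕ) ^ 31 = 2 ^ 30 * 2 := by ring
      omega
    rw [Nat.mod_eq_sub_mod hXge, Nat.mod_eq_of_lt hlt]
  have hpc : PySem.Int.bitCount ((x.toNat : ℕ) : ℤ)
      = PySem.Int.bitCount ((x.toNat - 2 ^ 30 : ℕ) : ℤ) + 1 := by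
    have h := pc_add_pow 30 (x.toNat - 2 ^ 30) (by
      have : (2 : ℕ) ^ 31 = 2 ^ 30 * 2 := by ring
      omega)
    rw [Nat.sub_add_cancel hXge] at h
    exact h
  rw [hmod, hpc]
  have e30 : ((2 ^ 30 : ℕ) : ℤ) = 1073741824 := by norm_num
  have e31 : ((2 ^ 31 : ℕ) : ℤ) = 2147483648 := by norm_num
  intro hEq
  push_cast at hEq
  omega
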